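-- pv_equiv track=rewrite | github.com/NesuroH/Course_work | main.py | mask_account_number
-- ===== SOURCE A (Python) =====
-- def mask_account_number(account_number):
--     first_account_number = ''
--     for symbol in account_number:
--         if symbol.isalpha():
--             continue
--         elif symbol.isdigit():
--             first_account_number += symbol
--         elif symbol.isspace():
--             continue
--     masked_account_number = "**" + first_account_number[-4:]
--     return masked_account_number
-- ===== SOURCE B (Python) =====
-- def mask_account_number(account_number):
--     # Scan from the end, keep only the last four digits, stop early.
--     buf = []
--     for ch in reversed(account_number):
--         if ch.isdigit():
--             buf.append(ch)
--             if len(buf) == 4: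
--                 break
--     return "**" + ''.join(reversed(buf))
-- ===== Notes on version B (the rewrite author's own statement) =====
-- stated objective: alternative
-- what changed: B scans the string in reverse maintaining a bounded 4-digit buffer and stops as soon as four digits are found, instead of A's forward pass that accumulates every digit and then slices the last four.
import Mathlib
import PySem

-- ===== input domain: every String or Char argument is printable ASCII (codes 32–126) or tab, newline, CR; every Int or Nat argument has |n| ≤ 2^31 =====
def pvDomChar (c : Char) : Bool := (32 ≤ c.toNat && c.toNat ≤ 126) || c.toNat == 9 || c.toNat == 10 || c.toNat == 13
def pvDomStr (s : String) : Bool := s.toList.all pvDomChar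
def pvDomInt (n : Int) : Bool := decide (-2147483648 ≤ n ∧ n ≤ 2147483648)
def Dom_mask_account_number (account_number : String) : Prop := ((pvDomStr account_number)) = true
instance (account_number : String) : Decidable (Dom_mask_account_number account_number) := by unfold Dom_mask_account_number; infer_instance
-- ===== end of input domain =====

-- B scans the string in reverse with a bounded 4-digit buffer and stops early,
-- instead of A's forward pass collecting all digits then slicing the last four (objective: alternative).

-- ===== PORT A =====
-- forward loop: skip alpha, append digit, skip space, (implicitly) skip everything else
def mask_account_number (account_number : String) : String :=
  let first_account_number : List Char :=
    account_number.toList.foldl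
      (fun acc c =>
        if PySem.Chars.isalpha c then acc
        else if PySem.Chars.isdigit c then acc ++ [c]
        else if PySem.Chars.isspace c then acc
        else acc)
      []
  String.ofList (['*', '*'] ++ PySem.List.slice first_account_number (some (-4)) none)

-- ===== PORT B =====
-- reverse scan, prepend each digit (keeps forward order), break once the buffer holds 4
def maskAltGo : List Char → List Char → List Char
  | [], acc => acc
  | c :: rest, acc =>
    if PySem.Chars.isdigit c then
      let acc' := c :: acc
      if acc'.length = 4 then acc' else maskAltGo rest acc'
    else maskAltGo rest acc

def mask_account_number_alt (account_number : String) : String :=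
  String.ofList ('*' :: '*' :: maskAltGo account_number.toList.reverse [])

-- ===== PRECONDITION & SPEC =====
def Spec_mask_account_number (account_number : String) (out : String) : Prop := out = mask_account_number_alt account_number
instance (account_number : String) (out : String) : Decidable (Spec_mask_account_number account_number out) := by unfold Spec_mask_account_number; infer_instance

-- ===== CLAIM (what is proved, stated in full; the proofs are below) =====
def Claim_equal_mask_account_number : Prop := ∀ (account_number : String), Dom_mask_account_number account_number → Spec_mask_account_number account_number (mask_account_number account_number)

-- ===== LEMMAS AND PROOFS =====

-- a digit is never a letter, so A's step keeps exactly the digits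
theorem isalpha_eq_false_of_isdigit (c : Char) (h : PySem.Chars.isdigit c = true) :
    PySem.Chars.isalpha c = false := by
  have h0 : '0'.val.toNat = 48 := rfl
  have h9 : '9'.val.toNat = 57 := rfl
  have hA : 'A'.val.toNat = 65 := rfl
  have hZ : 'Z'.val.toNat = 90 := rfl
  have ha : 'a'.val.toNat = 97 := rfl
  have hz : 'z'.val.toNat = 122 := rfl
  simp only [PySem.Chars.isdigit, PySem.Chars.isalpha, PySem.Chars.isupper, PySem.Chars.islower,
    Bool.and_eq_true, Bool.or_eq_false_iff, Bool.and_eq_false_iff, decide_eq_true_eq,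
    decide_eq_false_iff_not, Char.le_def, UInt32.le_iff_toNat_le, h0, h9, hA, hZ, ha, hz] at h ⊢
  omega

-- A's fold accumulates exactly the digits, in order
theorem foldA_eq_filter (l : List Char) (acc : List Char) :
    l.foldl
      (fun acc c =>
        if PySem.Chars.isalpha c then acc
        else if PySem.Chars.isdigit c then acc ++ [c]
        else if PySem.Chars.isspace c then acc
        else acc)
      acc = acc ++ l.filter PySem.Chars.isdigit := by
  induction l generalizing acc with
  | nil => simp
  | cons c rest ih =>
    rw [List.foldl_cons]
    by_cases hd : PySem.Chars.isdigit c = true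
    · rw [if_neg (by simp [isalpha_eq_false_of_isdigit c hd]), if_pos hd, ih,
        List.filter_cons_of_pos hd]
      simp
    · have hstep : (if PySem.Chars.isalpha c = true then acc
          else if PySem.Chars.isdigit c = true then acc ++ [c]
          else if PySem.Chars.isspace c = true then acc else acc) = acc := by
        split_ifs <;> simp_all
      rw [hstep, ih, List.filter_cons_of_neg (by simpa using hd)]

-- B's reverse scan with a buffer shorter than 4 takes the next (4 - |acc|) digits
theorem maskAltGo_eq_take (l : List Char) (acc : List Char) (h : acc.length < 4) :
    maskAltGo l acc = ((l.filter PySem.Chars.isdigit).take (4 - acc.length)).reverse ++ acc := by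
  induction l generalizing acc with
  | nil => simp [maskAltGo]
  | cons c rest ih =>
    by_cases hd : PySem.Chars.isdigit c = true
    · simp only [maskAltGo, hd, if_true, List.filter_cons, List.length_cons]
      by_cases h4 : acc.length + 1 = 4
      · have : 4 - acc.length = 1 := by omega
        simp [h4, this]
      · have hlt : acc.length + 1 < 4 := by omega
        have : 4 - acc.length = (4 - (acc.length + 1)) + 1 := by omega
        simp only [h4, if_false, ih (c :: acc) (by simpa using hlt), List.length_cons, this,
          List.take_succ_cons, List.reverse_cons, List.append_assoc, List.singleton_append]
    · simp only [Bool.not_eq_true] at hd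
      simp [maskAltGo, hd, ih acc h]

-- ===== VERDICT (by name: the statement is the Claim_ definition above) =====
theorem mask_account_number_spec : Claim_equal_mask_account_number := by
  intro s _
  unfold Spec_mask_account_number mask_account_number mask_account_number_alt
  have hA := foldA_eq_filter s.toList []
  have hB := maskAltGo_eq_take s.toList.reverse [] (by simp)
  simp only [hA, hB, List.nil_append, List.append_nil, List.filter_reverse] at *
  rw [List.take_reverse, List.reverse_reverse,
    PySem.List.slice_from_neg_ofNat _ 4 (by omega)]
  simp
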